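-- pv_equiv track=rewrite | github.com/valborgs/PDF-Redactor | src/pdfmask/managers/license_manager.py | validate_serial
-- ===== SOURCE A (Python) =====
-- from typing import Tuple
--
-- def validate_serial(serial: str) -> Tuple[bool, str]:
--     """
--     시리얼 번호 형식 검증 (로컬 검증)
--
--     Args:
--         serial: 입력된 시리얼 번호
--
--     Returns:
--         Tuple[bool, str]: (검증 성공 여부, 메시지)
--     """
--     # 시리얼 번호 형식 검증 (예: XXXX-XXXX-XXXX-XXXX)
--     serial = serial.strip().upper()
--
--     if len(serial) == 0:
--         return False, "시리얼 번호를 입력해주세요."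
--
--     # 간단한 형식 검증
--     parts = serial.split('-')
--     if len(parts) != 4:
--         return False, "올바른 형식이 아닙니다. (XXXX-XXXX-XXXX-XXXX)"
--
--     for part in parts:
--         if len(part) != 4:
--             return False, "올바른 형식이 아닙니다. (XXXX-XXXX-XXXX-XXXX)"
--
--     return True, "형식 검증 성공"
-- ===== SOURCE B (Python) =====
-- from typing import Tuple
--
-- def validate_serial(serial: str) -> Tuple[bool, str]:
--     serial = serial.strip().upper()
--
--     if len(serial) == 0:
--         return False, "시리얼 번호를 입력해주세요."
--
--     # XXXX-XXXX-XXXX-XXXX <=> 19 chars with '-' exactly at positions 4, 9, 14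
--     if len(serial) == 19 and all((c == '-') == (i % 5 == 4) for i, c in enumerate(serial)):
--         return True, "형식 검증 성공"
--
--     return False, "올바른 형식이 아닙니다. (XXXX-XXXX-XXXX-XXXX)"
-- ===== Notes on version B (the rewrite author's own statement) =====
-- stated objective: simpler
-- what changed: B replaces A's split-on-dash plus length-of-parts-list check plus per-part length loop by a single positional test: the trimmed string is valid iff it has length 19 and the dash separator occurs exactly at indices 4, 9 and 14 (one pass over the characters).
import Mathlib
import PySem

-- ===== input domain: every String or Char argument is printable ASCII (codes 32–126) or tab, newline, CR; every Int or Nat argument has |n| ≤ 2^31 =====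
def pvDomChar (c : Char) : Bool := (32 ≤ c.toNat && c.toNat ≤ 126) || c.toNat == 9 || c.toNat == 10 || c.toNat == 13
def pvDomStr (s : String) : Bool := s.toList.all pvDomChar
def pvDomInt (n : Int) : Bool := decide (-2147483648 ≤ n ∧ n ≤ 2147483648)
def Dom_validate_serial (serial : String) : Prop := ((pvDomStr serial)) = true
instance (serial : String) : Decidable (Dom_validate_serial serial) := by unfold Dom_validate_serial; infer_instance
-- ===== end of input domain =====

-- B replaces A's split-on-dash + per-part length loop by a single positional scan
-- (length 19 and '-' exactly at indices 4, 9, 14); objective: simpler, same cost.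

def vsMsgEmpty : String := "시리얼 번호를 입력해주세요."
def vsMsgFmt : String := "올바른 형식이 아닙니다. (XXXX-XXXX-XXXX-XXXX)"
def vsMsgOk : String := "형식 검증 성공"

-- ===== PORT A =====
-- the 'for part in parts' early-return loop of A
def vsLoop : List (List Char) → Option (Bool × String)
  | [] => none
  | p :: rest => if p.length ≠ 4 then some (false, vsMsgFmt) else vsLoop rest

def validate_serial (serial : String) : Bool × String :=
  let s := PySem.Chars.upper (PySem.Chars.strip serial.toList)
  if s.length = 0 then (false, vsMsgEmpty)
  else
    let parts := PySem.Chars.splitOn s ['-']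
    if parts.length ≠ 4 then (false, vsMsgFmt)
    else match vsLoop parts with
      | some r => r
      | none => (true, vsMsgOk)

-- ===== PORT B =====
def validate_serial_alt (serial : String) : Bool × String :=
  let s := PySem.Chars.upper (PySem.Chars.strip serial.toList)
  if s.length = 0 then (false, vsMsgEmpty)
  else if (s.length == 19) &&
      (PySem.List.enumerate s).all (fun ic => (ic.2 == '-') == (PySem.Int.mod ic.1 5 == 4))
  then (true, vsMsgOk)
  else (false, vsMsgFmt)

-- ===== PRECONDITION & SPEC =====
def Spec_validate_serial (serial : String) (out : Bool × String) : Prop := out = validate_serial_alt serial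
instance (serial : String) (out : Bool × String) : Decidable (Spec_validate_serial serial out) := by unfold Spec_validate_serial; infer_instance

-- ===== CLAIM (what is proved, stated in full; the proofs are below) =====
def Claim_equal_validate_serial : Prop := ∀ (serial : String), Dom_validate_serial serial → Spec_validate_serial serial (validate_serial serial)

-- ===== LEMMAS AND PROOFS =====

-- simple structural model of str.split('-') used only in the proofs
def mySplit : List Char → List (List Char)
  | [] => [[]]
  | c :: rest => if c = '-' then [] :: mySplit rest else (mySplit rest).modifyHead (c :: ·)

lemma mySplit_ne_nil (l : List Char) : mySplit l ≠ [] := by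
  induction l with
  | nil => simp [mySplit]
  | cons c rest ih =>
    simp only [mySplit]
    split
    · simp
    · cases h : mySplit rest with
      | nil => exact absurd h ih
      | cons p ps => simp [List.modifyHead]

lemma go_eq_mySplit (l : List Char) : ∀ (fuel : Nat) (cur : List Char) (acc : List (List Char)),
    l.length < fuel →
    PySem.Chars.splitOn.go ['-'] fuel l cur acc
      = acc.reverse ++ (mySplit l).modifyHead (cur.reverse ++ ·) := by
  induction l with
  | nil =>
    intro fuel cur acc h
    match fuel with
    | fuel + 1 => simp [PySem.Chars.splitOn.go, mySplit]
  | cons c rest ih =>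
    intro fuel cur acc h
    match fuel with
    | fuel + 1 =>
      by_cases hc : c = '-'
      · subst hc
        have : List.isPrefixOf ['-'] ('-' :: rest) = true := by simp [List.isPrefixOf]
        simp only [PySem.Chars.splitOn.go, this, if_pos]
        have hdrop : List.drop (['-'] : List Char).length ('-' :: rest) = rest := rfl
        rw [hdrop, ih fuel [] (cur.reverse :: acc) (by simpa using h)]
        have hne := mySplit_ne_nil rest
        cases hms : mySplit rest with
        | nil => exact absurd hms hne
        | cons p ps => simp [mySplit, hms, List.modifyHead]
      · have : List.isPrefixOf ['-'] (c :: rest) = false := by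
          simp [List.isPrefixOf]; exact fun h' => absurd h'.symm hc
        simp only [PySem.Chars.splitOn.go, this, Bool.false_eq_true, if_false]
        rw [ih fuel (c :: cur) acc (by simpa using h)]
        cases hms : mySplit rest with
        | nil => exact absurd hms (mySplit_ne_nil rest)
        | cons p ps => simp [mySplit, hc, hms, List.modifyHead]

lemma splitOn_eq_mySplit (l : List Char) : PySem.Chars.splitOn l ['-'] = mySplit l := by
  unfold PySem.Chars.splitOn
  rw [go_eq_mySplit l (l.length + 1) [] [] (by omega)]
  cases hms : mySplit l with
  | nil => exact absurd hms (mySplit_ne_nil l)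
  | cons p ps => simp [List.modifyHead]



-- decompose l back from its split
lemma mySplit_join (l : List Char) : ∀ p ps, mySplit l = p :: ps →
    ('-' ∉ p) ∧ (ps = [] → l = p) ∧ (ps ≠ [] → ∃ r, l = p ++ '-' :: r ∧ mySplit r = ps) := by
  induction l with
  | nil =>
    intro p ps h
    simp only [mySplit, List.cons.injEq] at h
    obtain ⟨h1, h2⟩ := h
    subst h1; subst h2
    exact ⟨by simp, fun _ => rfl, fun hne => absurd rfl hne⟩
  | cons c rest ih =>
    intro p ps h
    by_cases hc : c = '-'
    · subst hc
      simp only [mySplit, ite_true, List.cons.injEq] at h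
      obtain ⟨h1, h2⟩ := h
      subst h1; subst h2
      refine ⟨by simp, ?_, ?_⟩
      · intro hnil; exact absurd hnil (mySplit_ne_nil rest)
      · intro _; exact ⟨rest, by simp, rfl⟩
    · cases hms : mySplit rest with
      | nil => exact absurd hms (mySplit_ne_nil rest)
      | cons q qs =>
        simp only [mySplit, hc, if_false, hms, List.modifyHead, List.cons.injEq] at h
        obtain ⟨h1, h2⟩ := h
        subst h1; subst h2
        obtain ⟨hq, hnil, hcons⟩ := ih q qs hms
        refine ⟨?_, ?_, ?_⟩
        · intro hm
          rcases List.mem_cons.mp hm with h1 | h1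
          · exact hc h1.symm
          · exact hq h1
        · intro h0; rw [hnil h0]
        · intro h0
          obtain ⟨r, hr, hmr⟩ := hcons h0
          exact ⟨r, by rw [hr, List.cons_append], hmr⟩

lemma len4_explicit {α : Type} (p : List α) (h : p.length = 4) :
    ∃ a b c d, p = [a, b, c, d] := by
  match p, h with
  | [a, b, c, d], _ => exact ⟨a, b, c, d, rfl⟩

lemma vsLoop_none_iff (ps : List (List Char)) :
    vsLoop ps = none ↔ ∀ p ∈ ps, p.length = 4 := by
  induction ps with
  | nil => simp [vsLoop]
  | cons p rest ih =>
    by_cases h : p.length = 4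
    · simp [vsLoop, h, ih]
    · simp [vsLoop, h]

lemma vsLoop_some (ps : List (List Char)) (r : Bool × String) (h : vsLoop ps = some r) :
    r = (false, vsMsgFmt) := by
  induction ps with
  | nil => simp [vsLoop] at h
  | cons p rest ih =>
    simp only [vsLoop] at h
    split at h
    · exact (Option.some.injEq _ _ ▸ h).symm
    · exact ih h

-- the B-side positional check
def bChk (s : List Char) : Bool :=
  (s.length == 19) &&
    (PySem.List.enumerate s).all (fun ic => (ic.2 == '-') == (PySem.Int.mod ic.1 5 == 4))

lemma key (l : List Char) :
    ((mySplit l).length = 4 ∧ vsLoop (mySplit l) = none) ↔ bChk l = true := by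
  constructor
  · rintro ⟨hlen, hloop⟩
    rw [vsLoop_none_iff] at hloop
    obtain ⟨p1, p2, p3, p4, hms⟩ := len4_explicit (mySplit l) hlen
    · have h1 := hloop p1 (by rw [hms]; simp)
      have h2 := hloop p2 (by rw [hms]; simp)
      have h3 := hloop p3 (by rw [hms]; simp)
      have h4 := hloop p4 (by rw [hms]; simp)
      obtain ⟨nd1, _, hc1⟩ := mySplit_join l p1 [p2, p3, p4] hms
      obtain ⟨r1, hl1, hms1⟩ := hc1 (by simp)
      obtain ⟨nd2, _, hc2⟩ := mySplit_join r1 p2 [p3, p4] hms1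
      obtain ⟨r2, hl2, hms2⟩ := hc2 (by simp)
      obtain ⟨nd3, _, hc3⟩ := mySplit_join r2 p3 [p4] hms2
      obtain ⟨r3, hl3, hms3⟩ := hc3 (by simp)
      obtain ⟨nd4, he4, _⟩ := mySplit_join r3 p4 [] hms3
      have hr3 : r3 = p4 := he4 rfl
      obtain ⟨a0, a1, a2, a3, rfl⟩ := len4_explicit p1 h1
      obtain ⟨b0, b1, b2, b3, rfl⟩ := len4_explicit p2 h2
      obtain ⟨c0, c1, c2, c3, rfl⟩ := len4_explicit p3 h3
      obtain ⟨d0, d1, d2, d3, rfl⟩ := len4_explicit p4 h4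
      subst hr3; subst hl3; subst hl2; subst hl1
      simp only [List.mem_cons, List.not_mem_nil, or_false, not_or] at nd1 nd2 nd3 nd4
      simp only [bChk, List.cons_append, List.nil_append, PySem.List.enumerate,
        List.all_cons, List.all_nil, Bool.and_eq_true, and_true]
      norm_num [PySem.Int.mod, Int.fmod]
      refine ⟨?_, ?_, ?_, ?_, ?_, ?_, ?_, ?_, ?_, ?_, ?_, ?_, ?_, ?_, ?_, ?_⟩ <;>
        (intro hx; first
              | exact nd1.1 hx.symm | exact nd1.2.1 hx.symm | exact nd1.2.2.1 hx.symm | exact nd1.2.2.2 hx.symm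
              | exact nd2.1 hx.symm | exact nd2.2.1 hx.symm | exact nd2.2.2.1 hx.symm | exact nd2.2.2.2 hx.symm
              | exact nd3.1 hx.symm | exact nd3.2.1 hx.symm | exact nd3.2.2.1 hx.symm | exact nd3.2.2.2 hx.symm
              | exact nd4.1 hx.symm | exact nd4.2.1 hx.symm | exact nd4.2.2.1 hx.symm | exact nd4.2.2.2 hx.symm)
  · intro hb
    simp only [bChk, Bool.and_eq_true, beq_iff_eq] at hb
    obtain ⟨hlen, hall⟩ := hb
    match l, hlen with
    | [a0, a1, a2, a3, e0, b0, b1, b2, b3, e1, c0, c1, c2, c3, e2, d0, d1, d2, d3], _ =>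
      simp only [PySem.List.enumerate, List.all_cons, List.all_nil,
        Bool.and_eq_true, and_true] at hall
      norm_num [PySem.Int.mod, Int.fmod] at hall
      obtain ⟨ha0, ha1, ha2, ha3, he0, hb0, hb1, hb2, hb3, he1,
        hc0, hc1, hc2, hc3, he2, hd0, hd1, hd2, hd3⟩ := hall
      subst he0; subst he1; subst he2
      simp [mySplit, ha0, ha1, ha2, ha3, hb0, hb1, hb2, hb3,
        hc0, hc1, hc2, hc3, hd0, hd1, hd2, hd3, vsLoop, List.modifyHead]

-- ===== VERDICT (by name: the statement is the Claim_ definition above) =====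
theorem validate_serial_spec : Claim_equal_validate_serial := by
  intro serial _
  unfold Spec_validate_serial validate_serial validate_serial_alt
  set s := PySem.Chars.upper (PySem.Chars.strip serial.toList) with hs
  by_cases h0 : s.length = 0
  · simp [h0]
  · simp only [h0, if_false]
    rw [splitOn_eq_mySplit]
    by_cases hb : bChk s = true
    · obtain ⟨hlen, hloop⟩ := (key s).mpr hb
      simp only [bChk] at hb
      rw [if_neg (fun hne => hne hlen), hloop, hb]
      simp
    · have hb' : ((s.length == 19) &&
          (PySem.List.enumerate s).all (fun ic => (ic.2 == '-') == (PySem.Int.mod ic.1 5 == 4))) = false := by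
        simpa [bChk] using hb
      simp only [hb', Bool.false_eq_true, if_false]
      by_cases hlen : (mySplit s).length = 4
      · cases hloop : vsLoop (mySplit s) with
        | none => exact absurd ((key s).mp ⟨hlen, hloop⟩) hb
        | some r => simp [hlen, vsLoop_some _ _ hloop]
      · simp [hlen]
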